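-- pv_equiv track=rewrite | github.com/kataev/bkz | brick/views.py | calc
-- ===== SOURCE A (Python) =====
-- def calc(opers):
--     d = dict()
--     for k,o in opers.items():
--         for i,v in o.items():
--             if k in ['sold','t_from','inv','f_from']:
--                 d[i]=d.get(i,0) + v
--             if k in ['t_to','add','m_to']:
--                 d[i]=d.get(i,0) - v
--     return d
-- ===== SOURCE B (Python) =====
-- SIGN = {'sold': 1, 't_from': 1, 'inv': 1, 'f_from': 1,
--         't_to': -1, 'add': -1, 'm_to': -1}
--
-- def calc(opers):
--     pairs = [(i, SIGN[k] * v) for k, o in opers.items() if k in SIGN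
--              for i, v in o.items()]
--     keys = list(dict.fromkeys(i for i, _ in pairs))
--     return {i: sum(v for j, v in pairs if j == i) for i in keys}
-- ===== Notes on version B (the rewrite author's own statement) =====
-- stated objective: alternative
-- what changed: Replaces A's mutable dict accumulator updated inside nested loops with a staged pipeline: flatten all operations into one stream of signed (item, value) pairs, dedupe the item keys in first-occurrence order, then group-sum the stream per key.
import Mathlib
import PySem

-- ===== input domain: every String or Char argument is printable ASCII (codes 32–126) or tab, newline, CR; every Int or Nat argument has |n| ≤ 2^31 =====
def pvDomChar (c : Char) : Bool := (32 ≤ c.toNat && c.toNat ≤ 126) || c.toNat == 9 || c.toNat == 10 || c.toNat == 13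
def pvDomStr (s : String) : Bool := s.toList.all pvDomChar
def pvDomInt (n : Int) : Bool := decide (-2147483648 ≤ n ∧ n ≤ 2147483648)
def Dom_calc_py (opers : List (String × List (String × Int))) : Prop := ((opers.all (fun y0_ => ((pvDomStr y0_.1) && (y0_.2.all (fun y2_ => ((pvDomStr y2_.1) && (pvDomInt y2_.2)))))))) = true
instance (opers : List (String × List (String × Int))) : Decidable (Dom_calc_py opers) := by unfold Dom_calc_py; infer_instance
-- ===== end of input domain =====

-- B flattens the operations into one stream of signed (item, value) pairs and then
-- group-sums that stream per first-occurrence key; same output, no accumulator dict (objective: alternative).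

-- ===== PORT A =====
def calc_py (opers : List (String × List (String × Int))) : List (String × Int) :=
  (opers.foldl
    (fun d kp =>
      kp.2.foldl
        (fun d iv =>
          let d := if kp.1 ∈ ["sold", "t_from", "inv", "f_from"]
                   then d.insert iv.1 (d.getD iv.1 0 + iv.2) else d
          if kp.1 ∈ ["t_to", "add", "m_to"]
          then d.insert iv.1 (d.getD iv.1 0 - iv.2) else d)
        d)
    (PySem.Dict.empty : PySem.Dict String Int)).items

-- ===== PORT B =====
-- the SIGN dict literal of Source B
def signDict : PySem.Dict String Int :=
  PySem.Dict.ofList [("sold", 1), ("t_from", 1), ("inv", 1), ("f_from", 1),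
                     ("t_to", -1), ("add", -1), ("m_to", -1)]

-- the flattening comprehension of Source B: [(i, SIGN[k]*v) for k,o in … if k in SIGN for i,v in o]
def signedPairs (opers : List (String × List (String × Int))) : List (String × Int) :=
  opers.flatMap (fun kp =>
    if signDict.contains kp.1
    then kp.2.map (fun iv => (iv.1, signDict.getD kp.1 0 * iv.2))
    else [])

def calc_py_alt (opers : List (String × List (String × Int))) : List (String × Int) :=
  let pairs := signedPairs opers
  let keys := PySem.List.dedup (pairs.map (·.1))   -- list(dict.fromkeys(...))
  keys.map (fun i => (i, ((pairs.filter (fun p => p.1 == i)).map (·.2)).sum))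

-- ===== PRECONDITION & SPEC =====
def Spec_calc_py (opers : List (String × List (String × Int))) (out : List (String × Int)) : Prop := out = calc_py_alt opers
instance (opers : List (String × List (String × Int))) (out : List (String × Int)) : Decidable (Spec_calc_py opers out) := by unfold Spec_calc_py; infer_instance

-- ===== CLAIM (what is proved, stated in full; the proofs are below) =====
def Claim_equal_calc_py : Prop := ∀ (opers : List (String × List (String × Int))), Dom_calc_py opers → Spec_calc_py opers (calc_py opers)

-- ===== LEMMAS AND PROOFS =====

-- the single accumulation step over a signed pair
def accStep (d : PySem.Dict String Int) (p : String × Int) : PySem.Dict String Int :=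
  d.insert p.1 (d.getD p.1 0 + p.2)

def signKeys : List String := ["sold", "t_from", "inv", "f_from", "t_to", "add", "m_to"]

lemma keys_signDict : signDict.keys = signKeys := by decide

-- one operation of A equals folding accStep over its signed pairs
lemma inner_eq (k : String) (o : List (String × Int)) (d : PySem.Dict String Int) :
    o.foldl
      (fun d iv =>
        let d := if k ∈ ["sold", "t_from", "inv", "f_from"]
                 then d.insert iv.1 (d.getD iv.1 0 + iv.2) else d
        if k ∈ ["t_to", "add", "m_to"]
        then d.insert iv.1 (d.getD iv.1 0 - iv.2) else d)
      d =
    (if signDict.contains k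
     then o.map (fun iv => (iv.1, signDict.getD k 0 * iv.2))
     else []).foldl accStep d := by
  by_cases hp : k ∈ (["sold", "t_from", "inv", "f_from"] : List String)
  · have hn : k ∉ (["t_to", "add", "m_to"] : List String) := by
      simp only [List.mem_cons, List.not_mem_nil] at hp ⊢
      rcases hp with h | h | h | h | h <;> first | (subst h; decide) | exact h.elim
    have hc : signDict.contains k = true := by
      simp only [List.mem_cons, List.not_mem_nil] at hp
      rcases hp with h | h | h | h | h <;> first | (subst h; decide) | exact h.elim
    have hs : signDict.getD k 0 = 1 := by
      simp only [List.mem_cons, List.not_mem_nil] at hp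
      rcases hp with h | h | h | h | h <;> first | (subst h; decide) | exact h.elim
    rw [if_pos hc, hs, List.foldl_map]
    simp only [if_pos hp, if_neg hn, accStep, one_mul]
  · by_cases hn : k ∈ (["t_to", "add", "m_to"] : List String)
    · have hc : signDict.contains k = true := by
        simp only [List.mem_cons, List.not_mem_nil] at hn
        rcases hn with h | h | h | h <;> first | (subst h; decide) | exact h.elim
      have hs : signDict.getD k 0 = -1 := by
        simp only [List.mem_cons, List.not_mem_nil] at hn
        rcases hn with h | h | h | h <;> first | (subst h; decide) | exact h.elim
      rw [if_pos hc, hs, List.foldl_map]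
      simp only [if_neg hp, if_pos hn, accStep, neg_one_mul, ← sub_eq_add_neg]
    · have hc : signDict.contains k = false := by
        rw [PySem.Dict.contains_eq_decide_mem_keys, keys_signDict]
        simp only [signKeys, List.mem_cons, List.not_mem_nil] at hp hn ⊢
        simp only [decide_eq_false_iff_not]
        tauto
      rw [if_neg (by simp [hc]), List.foldl_nil]
      simp only [if_neg hp, if_neg hn]
      induction o generalizing d with
      | nil => rfl
      | cons x xs ih => simpa only [List.foldl_cons] using ih d

-- A's whole fold equals folding accStep over the flattened signed pairs
lemma outer_eq (opers : List (String × List (String × Int))) (d : PySem.Dict String Int) :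
    opers.foldl
      (fun d kp =>
        kp.2.foldl
          (fun d iv =>
            let d := if kp.1 ∈ ["sold", "t_from", "inv", "f_from"]
                     then d.insert iv.1 (d.getD iv.1 0 + iv.2) else d
            if kp.1 ∈ ["t_to", "add", "m_to"]
            then d.insert iv.1 (d.getD iv.1 0 - iv.2) else d)
          d)
      d =
    (signedPairs opers).foldl accStep d := by
  induction opers generalizing d with
  | nil => rfl
  | cons kp rest ih =>
    rw [List.foldl_cons, inner_eq,
        show signedPairs (kp :: rest)
          = (if signDict.contains kp.1
             then kp.2.map (fun iv => (iv.1, signDict.getD kp.1 0 * iv.2))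
             else []) ++ signedPairs rest from by simp [signedPairs],
        List.foldl_append]
    exact ih _

-- getD of the accStep fold is the starting value plus the group sum
lemma getD_fold (pairs : List (String × Int)) (d : PySem.Dict String Int) (i : String) :
    (pairs.foldl accStep d).getD i 0 =
      d.getD i 0 + ((pairs.filter (fun p => p.1 == i)).map (·.2)).sum := by
  induction pairs generalizing d with
  | nil => simp
  | cons p ps ih =>
    rw [List.foldl_cons, ih, List.filter_cons]
    by_cases h : p.1 = i
    · simp only [h, beq_self_eq_true, if_pos, List.map_cons, List.sum_cons, accStep]
      rw [PySem.Dict.getD_insert_self]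
      ring
    · have hne : i ≠ p.1 := fun hh => h hh.symm
      have hb : (p.1 == i) = false := by simp [h]
      rw [hb, if_neg (by simp), accStep.eq_def,
          PySem.Dict.getD_insert_of_ne (hne := hne)]

-- keys of the accStep fold from empty: first occurrences in order
lemma keys_fold (pairs : List (String × Int)) :
    (pairs.foldl accStep PySem.Dict.empty).keys = PySem.List.dedup (pairs.map (·.1)) := by
  rw [show (pairs.foldl accStep PySem.Dict.empty)
        = pairs.foldl (fun d p => d.insert p.1 (d.getD p.1 0 + p.2)) PySem.Dict.empty from rfl,
      PySem.Dict.keys_foldl_insert_key]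
  simp [PySem.Dict.keys_empty, PySem.Set.update_nil_left, PySem.List.dedup_eq_ofList]

lemma nodup_keys_fold (pairs : List (String × Int)) :
    (pairs.foldl accStep PySem.Dict.empty).keys.Nodup := by
  rw [keys_fold]
  exact PySem.List.nodup_dedup _

-- ===== VERDICT (by name: the statement is the Claim_ definition above) =====
theorem calc_py_spec : Claim_equal_calc_py := by
  intro opers _
  unfold Spec_calc_py calc_py calc_py_alt
  rw [outer_eq, PySem.Dict.items_eq_map_keys _ (nodup_keys_fold _) 0, keys_fold]
  refine List.map_congr_left (fun i _ => ?_)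
  rw [getD_fold, PySem.Dict.getD_empty, zero_add]
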